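-- pv_equiv track=rewrite | github.com/ekg1229/Baekjoon | 10250.py | room_number
-- ===== SOURCE A (Python) =====
-- def room_number(height, width, num):
--     cnt = 0
--     for w in range(1, width+1):
--         for h in range(1, height+1):
--             cnt += 1
--             if cnt == num and w < 10:
--                 return str(h) + str(0) + str(w)
--             elif cnt == num and w >= 10:
--                 return str(h) + str(w)
-- ===== SOURCE B (Python) =====
-- def room_number(height, width, num):
--     if height > 0 and width > 0 and 1 <= num <= height * width:
--         q, r = divmod(num - 1, height)
--         w, h = q + 1, r + 1
--         return str(h) + ("0" if w < 10 else "") + str(w)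
--     return None
-- ===== Notes on version B (the rewrite author's own statement) =====
-- stated objective: faster
-- what changed: A scans every room slot with nested loops counting up to num; B computes the column and floor directly with divmod(num-1, height) and a range check, no loop at all.
import Mathlib
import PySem

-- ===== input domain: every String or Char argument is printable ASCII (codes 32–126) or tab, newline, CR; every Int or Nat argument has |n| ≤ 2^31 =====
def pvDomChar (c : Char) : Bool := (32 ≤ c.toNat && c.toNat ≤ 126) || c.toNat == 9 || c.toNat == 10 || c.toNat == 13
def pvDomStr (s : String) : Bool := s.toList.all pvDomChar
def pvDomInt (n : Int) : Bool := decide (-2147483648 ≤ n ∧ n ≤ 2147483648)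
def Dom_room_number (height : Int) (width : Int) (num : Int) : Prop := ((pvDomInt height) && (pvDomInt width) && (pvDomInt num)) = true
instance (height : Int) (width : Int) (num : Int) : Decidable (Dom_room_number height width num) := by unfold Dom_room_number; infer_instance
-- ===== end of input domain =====

-- B replaces A's scan over all room slots by a direct division/modulo computation (asymptotically faster).

-- ===== PORT A =====
-- inner 'for h in range(1, height+1)' loop, transcribed as counting recursion (lazy like
-- Python's range: the loop returns as soon as cnt == num); yields the updated cnt and the
-- early-return value if any
def pvLoopH (w : Int) (hcur : Int) (height : Int) (num : Int) (cnt : Int) : Int × Option String :=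
  if _hlt : hcur < height + 1 then
    let cnt' := cnt + 1
    if cnt' = num ∧ w < 10 then
      (cnt', some (PySem.Int.toStr hcur ++ PySem.Int.toStr 0 ++ PySem.Int.toStr w))
    else if cnt' = num ∧ 10 ≤ w then
      (cnt', some (PySem.Int.toStr hcur ++ PySem.Int.toStr w))
    else pvLoopH w (hcur + 1) height num cnt'
  else (cnt, none)
termination_by (height + 1 - hcur).toNat
decreasing_by omega

-- outer 'for w in range(1, width+1)' loop, transcribed the same way
def pvLoopW (wcur : Int) (width : Int) (height : Int) (num : Int) (cnt : Int) : Option String :=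
  if _wlt : wcur < width + 1 then
    match pvLoopH wcur 1 height num cnt with
    | (_, some s) => some s
    | (cnt', none) => pvLoopW (wcur + 1) width height num cnt'
  else none
termination_by (width + 1 - wcur).toNat
decreasing_by omega

def room_number (height : Int) (width : Int) (num : Int) : Option String :=
  pvLoopW 1 width height num 0

-- ===== PORT B =====
def room_number_alt (height : Int) (width : Int) (num : Int) : Option String :=
  if 0 < height ∧ 0 < width ∧ 1 ≤ num ∧ num ≤ height * width then
    match PySem.Int.divmod? (num - 1) height with
    | some (q, r) =>
      some (PySem.Int.toStr (r + 1) ++ (if q + 1 < 10 then "0" else "") ++ PySem.Int.toStr (q + 1))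
    | none => none
  else none

-- ===== PRECONDITION & SPEC =====
def Spec_room_number (height : Int) (width : Int) (num : Int) (out : Option String) : Prop := out = room_number_alt height width num
instance (height : Int) (width : Int) (num : Int) (out : Option String) : Decidable (Spec_room_number height width num out) := by unfold Spec_room_number; infer_instance

-- ===== CLAIM (what is proved, stated in full; the proofs are below) =====
def Claim_equal_room_number : Prop := ∀ (height : Int) (width : Int) (num : Int), Dom_room_number height width num → Spec_room_number height width num (room_number height width num)

-- ===== LEMMAS AND PROOFS =====

lemma loopH_spec (w height num : Int) (n : Nat) : ∀ (hcur cnt : Int),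
    height + 1 - hcur = (n : Int) →
    pvLoopH w hcur height num cnt =
      if cnt < num ∧ num ≤ cnt + (n : Int) then
        (num, some (if w < 10 then
            PySem.Int.toStr (hcur + (num - cnt) - 1) ++ PySem.Int.toStr 0 ++ PySem.Int.toStr w
          else
            PySem.Int.toStr (hcur + (num - cnt) - 1) ++ PySem.Int.toStr w))
      else (cnt + (n : Int), none) := by
  induction n with
  | zero =>
    intro hcur cnt hfuel
    push_cast at hfuel ⊢
    unfold pvLoopH
    rw [dif_neg (by omega), if_neg (by omega)]
    norm_num
  | succ n ih =>
    intro hcur cnt hfuel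
    push_cast at hfuel ⊢
    unfold pvLoopH
    rw [dif_pos (by omega)]
    simp only []
    rw [ih (hcur + 1) (cnt + 1) (by omega)]
    by_cases hn : cnt + 1 = num
    · by_cases hw : w < 10
      · rw [if_pos ⟨hn, hw⟩,
            if_pos (show cnt < num ∧ num ≤ cnt + ((n : Int) + 1) from by omega),
            if_pos hw, show hcur + (num - cnt) - 1 = hcur from by omega, hn]
      · rw [if_neg (by tauto), if_pos ⟨hn, by omega⟩,
            if_pos (show cnt < num ∧ num ≤ cnt + ((n : Int) + 1) from by omega),
            if_neg hw, show hcur + (num - cnt) - 1 = hcur from by omega, hn]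
    · rw [if_neg (by tauto), if_neg (by tauto)]
      by_cases hf : cnt + 1 < num ∧ num ≤ cnt + 1 + (n : Int)
      · rw [if_pos hf,
            if_pos (show cnt < num ∧ num ≤ cnt + ((n : Int) + 1) from by omega),
            show hcur + 1 + (num - (cnt + 1)) - 1 = hcur + (num - cnt) - 1 from by ring]
      · rw [if_neg hf,
            if_neg (show ¬(cnt < num ∧ num ≤ cnt + ((n : Int) + 1)) from by omega),
            show cnt + 1 + (n : Int) = cnt + ((n : Int) + 1) from by ring]

lemma loopW_spec (width height num : Int) (hpos : 0 < height) (k : Nat) : ∀ (wcur cnt : Int),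
    width + 1 - wcur = (k : Int) →
    pvLoopW wcur width height num cnt =
      if cnt < num ∧ num ≤ cnt + (k : Int) * height then
        some (if wcur + (num - cnt - 1) / height < 10 then
            PySem.Int.toStr ((num - cnt - 1) % height + 1) ++ PySem.Int.toStr 0 ++
              PySem.Int.toStr (wcur + (num - cnt - 1) / height)
          else
            PySem.Int.toStr ((num - cnt - 1) % height + 1) ++
              PySem.Int.toStr (wcur + (num - cnt - 1) / height))
      else none := by
  induction k with
  | zero =>
    intro wcur cnt hfuel
    push_cast at hfuel ⊢
    unfold pvLoopW
    rw [dif_neg (by omega), if_neg (by omega)]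
  | succ k ih =>
    intro wcur cnt hfuel
    push_cast at hfuel ⊢
    unfold pvLoopW
    rw [dif_pos (by omega),
        loopH_spec wcur height num height.toNat 1 cnt (by omega)]
    rw [show (height.toNat : Int) = height from by omega]
    by_cases hfound : cnt < num ∧ num ≤ cnt + height
    · rw [if_pos hfound]
      simp only []
      have hd0 : 0 ≤ num - cnt - 1 := by omega
      have hdlt : num - cnt - 1 < height := by omega
      have hdiv : (num - cnt - 1) / height = 0 := Int.ediv_eq_zero_of_lt hd0 hdlt
      have hmod : (num - cnt - 1) % height = num - cnt - 1 := Int.emod_eq_of_lt hd0 hdlt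
      rw [if_pos (show cnt < num ∧ num ≤ cnt + ((k : Int) + 1) * height from
            ⟨hfound.1, by nlinarith [hfound.2]⟩),
          hdiv, hmod, show 1 + (num - cnt) - 1 = num - cnt - 1 + 1 from by ring,
          show wcur + (0 : Int) = wcur from by ring]
    · rw [if_neg hfound]
      simp only []
      rw [ih (wcur + 1) (cnt + height) (by omega)]
      by_cases hrest : cnt + height < num ∧ num ≤ cnt + height + (k : Int) * height
      · rw [if_pos hrest,
            if_pos (show cnt < num ∧ num ≤ cnt + ((k : Int) + 1) * height from
              ⟨by omega, by nlinarith [hrest.2]⟩)]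
        have hdiv : (num - (cnt + height) - 1) / height = (num - cnt - 1) / height - 1 := by
          have h := Int.add_mul_ediv_right (num - cnt - 1) (-1) (by omega : height ≠ 0)
          have he : num - cnt - 1 + -1 * height = num - (cnt + height) - 1 := by ring
          rw [he] at h
          omega
        have hmod : (num - (cnt + height) - 1) % height = (num - cnt - 1) % height := by
          conv_rhs => rw [show num - cnt - 1 = num - (cnt + height) - 1 + height * 1 from by ring]
          rw [Int.add_mul_emod_self_left]
        rw [hdiv, hmod,
            show wcur + 1 + ((num - cnt - 1) / height - 1) = wcur + (num - cnt - 1) / height from by ring]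
      · rw [if_neg hrest,
            if_neg (show ¬(cnt < num ∧ num ≤ cnt + ((k : Int) + 1) * height) from by
              intro hc
              apply hrest
              refine ⟨?_, by nlinarith [hc.2]⟩
              by_contra hlt
              exact hfound ⟨hc.1, by omega⟩)]

-- if height ≤ 0, the inner loop body never runs and the outer loop returns none
lemma loopW_none_of_height_nonpos (width height : Int) (hnp : height ≤ 0) (k : Nat) :
    ∀ (wcur num cnt : Int), width + 1 - wcur ≤ (k : Int) →
    pvLoopW wcur width height num cnt = none := by
  induction k with
  | zero =>
    intro wcur num cnt hfuel
    push_cast at hfuel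
    unfold pvLoopW
    rw [dif_neg (by omega)]
  | succ k ih =>
    intro wcur num cnt hfuel
    push_cast at hfuel
    unfold pvLoopW
    by_cases hlt : wcur < width + 1
    · rw [dif_pos hlt]
      have hin : pvLoopH wcur 1 height num cnt = (cnt, none) := by
        unfold pvLoopH
        rw [dif_neg (by omega)]
      rw [hin]
      simp only []
      exact ih (wcur + 1) num cnt (by omega)
    · rw [dif_neg hlt]

lemma toStr_zero : PySem.Int.toStr 0 = "0" := by decide

-- ===== VERDICT (by name: the statement is the Claim_ definition above) =====
theorem room_number_spec : Claim_equal_room_number := by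
  intro height width num _
  unfold Spec_room_number room_number room_number_alt
  by_cases hh : 0 < height
  · by_cases hw : 0 < width
    · rw [loopW_spec width height num hh width.toNat 1 0 (by omega)]
      rw [show (width.toNat : Int) = width from by omega]
      by_cases hn : 0 < num ∧ num ≤ 0 + width * height
      · have hdm : PySem.Int.divmod? (num - 1) height =
            some (PySem.Int.floordiv (num - 1) height, PySem.Int.mod (num - 1) height) := by
          simp [PySem.Int.divmod?]
          exact ⟨by omega, by simp [PySem.Int.floordiv], by simp [PySem.Int.mod]⟩
        rw [if_pos hn,
            if_pos (show 0 < height ∧ 0 < width ∧ 1 ≤ num ∧ num ≤ height * width from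
              ⟨hh, hw, by omega, by nlinarith [hn.2]⟩),
            hdm, PySem.Int.floordiv_eq_ediv_of_pos hh, PySem.Int.mod_eq_emod_of_pos hh]
        simp only []
        rw [show num - 0 - 1 = num - 1 from by ring,
            show (1 : Int) + (num - 1) / height = (num - 1) / height + 1 from by ring,
            toStr_zero]
        by_cases hten : (num - 1) / height + 1 < 10
        · rw [if_pos hten, if_pos hten]
        · rw [if_neg hten, if_neg hten, String.append_empty]
      · rw [if_neg hn,
            if_neg (show ¬(0 < height ∧ 0 < width ∧ 1 ≤ num ∧ num ≤ height * width) from by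
              intro hc
              exact hn ⟨by omega, by nlinarith [hc.2.2.2]⟩)]
    · unfold pvLoopW
      rw [dif_neg (by omega), if_neg (by tauto)]
  · rw [loopW_none_of_height_nonpos width height (by omega) width.toNat.succ 1 num 0 (by omega),
        if_neg (by tauto)]
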